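-- pv_equiv track=rewrite | github.com/jero98772/DiaNA | diana.py | extract_most_present_pattern_by_len
-- ===== SOURCE A (Python) =====
-- def extract_most_present_pattern_by_len(list_total_patterns_by_pattern):
--     most_present_patterns_by_len_list = {}
--     for k, v in list_total_patterns_by_pattern.items():
--         pattern_len = len(k)
--         if pattern_len in most_present_patterns_by_len_list.keys():
--             if v > most_present_patterns_by_len_list[pattern_len][1]:
--                 most_present_patterns_by_len_list[pattern_len] = k, v
--         else:
--             most_present_patterns_by_len_list[pattern_len] = k, v
--     return most_present_patterns_by_len_list
-- ===== SOURCE B (Python) =====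
-- def extract_most_present_pattern_by_len(list_total_patterns_by_pattern):
--     groups = {}
--     for k, v in list_total_patterns_by_pattern.items():
--         groups.setdefault(len(k), []).append((k, v))
--     return {pattern_len: max(pairs, key=lambda kv: kv[1])
--             for pattern_len, pairs in groups.items()}
-- ===== Notes on version B (the rewrite author's own statement) =====
-- stated objective: alternative
-- what changed: Replaces the single streaming running-max dict with a two-pass group-then-reduce: first group the (pattern, count) pairs by pattern length with setdefault/append, then pick each group's winner with max(key=count), whose first-maximal rule matches A's strict-> first-wins update.
import Mathlib
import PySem

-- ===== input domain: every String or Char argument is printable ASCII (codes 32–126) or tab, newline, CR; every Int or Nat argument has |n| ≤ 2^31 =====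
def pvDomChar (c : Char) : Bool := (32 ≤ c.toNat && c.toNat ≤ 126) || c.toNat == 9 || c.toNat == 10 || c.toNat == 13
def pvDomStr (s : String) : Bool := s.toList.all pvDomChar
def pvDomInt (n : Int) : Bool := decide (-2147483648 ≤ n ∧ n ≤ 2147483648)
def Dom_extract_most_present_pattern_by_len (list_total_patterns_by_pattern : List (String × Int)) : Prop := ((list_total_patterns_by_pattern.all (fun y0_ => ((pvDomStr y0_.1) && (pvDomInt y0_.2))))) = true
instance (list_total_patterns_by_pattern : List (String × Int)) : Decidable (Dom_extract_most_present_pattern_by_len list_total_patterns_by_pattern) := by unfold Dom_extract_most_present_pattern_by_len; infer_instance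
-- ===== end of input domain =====

-- B replaces A's streaming running-max dict by a group-by-length pass followed by max(key=count) per group (alternative decomposition, same cost).

-- ===== PORT A =====
def extract_most_present_pattern_by_len (list_total_patterns_by_pattern : List (String × Int)) : List (Int × String × Int) :=
  (list_total_patterns_by_pattern.foldl
    (fun d kv =>
      let pattern_len : Int := PySem.Str.len kv.1
      match d.get? pattern_len with
      | some cur => if kv.2 > cur.2 then d.insert pattern_len (kv.1, kv.2) else d
      | none => d.insert pattern_len (kv.1, kv.2))
    PySem.Dict.empty).items

-- ===== PORT B =====
def extract_most_present_pattern_by_len_alt (list_total_patterns_by_pattern : List (String × Int)) : List (Int × String × Int) :=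
  let groups : PySem.Dict Int (List (String × Int)) :=
    list_total_patterns_by_pattern.foldl
      (fun g kv => g.modify (PySem.Str.len kv.1) [] (fun ps => ps ++ [kv]))
      PySem.Dict.empty
  groups.items.map (fun e => (e.1, (PySem.List.max? e.2 (fun kv => kv.2)).getD ("", 0)))

-- ===== PRECONDITION & SPEC =====
def Spec_extract_most_present_pattern_by_len (list_total_patterns_by_pattern : List (String × Int)) (out : List (Int × String × Int)) : Prop := out = extract_most_present_pattern_by_len_alt list_total_patterns_by_pattern
instance (list_total_patterns_by_pattern : List (String × Int)) (out : List (Int × String × Int)) : Decidable (Spec_extract_most_present_pattern_by_len list_total_patterns_by_pattern out) := by unfold Spec_extract_most_present_pattern_by_len; infer_instance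

-- ===== CLAIM (what is proved, stated in full; the proofs are below) =====
def Claim_equal_extract_most_present_pattern_by_len : Prop := ∀ (list_total_patterns_by_pattern : List (String × Int)), Dom_extract_most_present_pattern_by_len list_total_patterns_by_pattern → Spec_extract_most_present_pattern_by_len list_total_patterns_by_pattern (extract_most_present_pattern_by_len list_total_patterns_by_pattern)

-- ===== LEMMAS AND PROOFS =====

-- A's loop body, named for the proofs (the let is inlined; defeq to the port's lambda)
def pvStepA (d : PySem.Dict Int (String × Int)) (kv : String × Int) : PySem.Dict Int (String × Int) :=
  match d.get? (PySem.Str.len kv.1) with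
  | some cur => if kv.2 > cur.2 then d.insert (PySem.Str.len kv.1) (kv.1, kv.2) else d
  | none => d.insert (PySem.Str.len kv.1) (kv.1, kv.2)

-- the folding step of PySem.List.max? with key (·.2)
def pvStep1 (acc : Option (String × Int)) (kv : String × Int) : Option (String × Int) :=
  match acc with
  | none => some kv
  | some m => if m.2 < kv.2 then some kv else some m

theorem pvStepA_get? (d : PySem.Dict Int (String × Int)) (kv : String × Int) (L : Int) :
    (pvStepA d kv).get? L =
      if PySem.Str.len kv.1 = L then pvStep1 (d.get? L) kv else d.get? L := by
  unfold pvStepA pvStep1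
  cases hg : d.get? (PySem.Str.len kv.1) with
  | none =>
    by_cases hL : PySem.Str.len kv.1 = L
    · subst hL
      rw [PySem.Dict.get?_insert, if_pos rfl, if_pos rfl, hg]
    · rw [PySem.Dict.get?_insert, if_neg (fun h => hL h.symm), if_neg hL]
  | some cur =>
    simp only [gt_iff_lt]
    by_cases hlt : cur.2 < kv.2
    · rw [if_pos hlt, PySem.Dict.get?_insert]
      by_cases hL : PySem.Str.len kv.1 = L
      · subst hL
        rw [if_pos rfl, if_pos rfl, hg]
        simp [hlt]
      · rw [if_neg (fun h => hL h.symm), if_neg hL]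
    · rw [if_neg hlt]
      by_cases hL : PySem.Str.len kv.1 = L
      · subst hL
        rw [if_pos rfl, hg]
        simp [hlt]
      · rw [if_neg hL]

theorem pvFoldA_get? (l : List (String × Int)) (d : PySem.Dict Int (String × Int)) (L : Int) :
    (l.foldl pvStepA d).get? L =
      (l.filter (fun kv => PySem.Str.len kv.1 == L)).foldl pvStep1 (d.get? L) := by
  induction l generalizing d with
  | nil => rfl
  | cons kv rest ih =>
    rw [List.foldl_cons, ih, List.filter_cons, pvStepA_get?]
    by_cases hL : PySem.Str.len kv.1 = L
    · rw [if_pos hL, if_pos (beq_iff_eq.mpr hL), List.foldl_cons]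
    · rw [if_neg hL, if_neg (fun h => hL (beq_iff_eq.mp h))]

theorem pvStepA_keys (d : PySem.Dict Int (String × Int)) (kv : String × Int) :
    (pvStepA d kv).keys = PySem.Set.add d.keys (PySem.Str.len kv.1) := by
  unfold pvStepA
  cases hg : d.get? (PySem.Str.len kv.1) with
  | none =>
    have hc : d.contains (PySem.Str.len kv.1) = false :=
      (PySem.Dict.get?_eq_none_iff_contains d _).mp hg
    have hm : PySem.Str.len kv.1 ∉ d.keys := by
      intro hmem
      rw [(PySem.Dict.contains_iff_mem_keys d _).mpr hmem] at hc
      cases hc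
    rw [PySem.Dict.keys_insert_of_not_contains d _ hc, PySem.Set.add_of_not_mem hm]
  | some cur =>
    have hc : d.contains (PySem.Str.len kv.1) = true := by
      cases hcc : d.contains (PySem.Str.len kv.1)
      · rw [(PySem.Dict.get?_eq_none_iff_contains d _).mpr hcc] at hg; cases hg
      · rfl
    have hm : PySem.Str.len kv.1 ∈ d.keys := (PySem.Dict.contains_iff_mem_keys d _).mp hc
    simp only [gt_iff_lt]
    by_cases hlt : cur.2 < kv.2
    · rw [if_pos hlt, PySem.Dict.keys_insert_of_contains d _ hc, PySem.Set.add_of_mem hm]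
    · rw [if_neg hlt, PySem.Set.add_of_mem hm]

theorem pvFoldA_keys (l : List (String × Int)) (d : PySem.Dict Int (String × Int)) :
    (l.foldl pvStepA d).keys =
      PySem.Set.update d.keys (l.map (fun kv => PySem.Str.len kv.1)) := by
  induction l generalizing d with
  | nil => rfl
  | cons kv rest ih =>
    rw [List.foldl_cons, List.map_cons, PySem.Set.update_cons, ih, pvStepA_keys]

theorem pvGroups_getD (l : List (String × Int)) (L : Int) :
    (l.foldl (fun g kv => g.modify (PySem.Str.len kv.1) [] (fun ps => ps ++ [kv]))
        (PySem.Dict.empty : PySem.Dict Int (List (String × Int)))).getD L [] =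
      l.filter (fun kv => PySem.Str.len kv.1 == L) := by
  have hmap :
      l.foldl (fun g kv => g.modify (PySem.Str.len kv.1) [] (fun ps => ps ++ [kv]))
        (PySem.Dict.empty : PySem.Dict Int (List (String × Int))) =
      (l.map (fun kv => (PySem.Str.len kv.1, kv))).foldl
        (fun g p => g.modify p.1 [] (fun ps => ps ++ [p.2])) PySem.Dict.empty := by
    rw [List.foldl_map]
  rw [hmap, PySem.Dict.getD_foldl_modify_append]
  simp [List.filter_map, Function.comp_def]

theorem pvMax?_eq_foldl (ps : List (String × Int)) :
    PySem.List.max? ps (fun kv => kv.2) = ps.foldl pvStep1 none := by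
  unfold PySem.List.max?
  congr 1
  funext acc kv
  cases acc <;> rfl

theorem pvMain (l : List (String × Int)) :
    (l.foldl pvStepA (PySem.Dict.empty : PySem.Dict Int (String × Int))).items =
      ((l.foldl (fun g kv => g.modify (PySem.Str.len kv.1) [] (fun ps => ps ++ [kv]))
          (PySem.Dict.empty : PySem.Dict Int (List (String × Int)))).items).map
        (fun e => (e.1, (PySem.List.max? e.2 (fun kv => kv.2)).getD ("", 0))) := by
  set dA := l.foldl pvStepA (PySem.Dict.empty : PySem.Dict Int (String × Int)) with hdA
  set dG := l.foldl (fun g kv => g.modify (PySem.Str.len kv.1) [] (fun ps => ps ++ [kv]))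
      (PySem.Dict.empty : PySem.Dict Int (List (String × Int))) with hdG
  have hkA : dA.keys = PySem.Set.update [] (l.map (fun kv => PySem.Str.len kv.1)) := by
    rw [hdA, pvFoldA_keys]; rfl
  have hkG : dG.keys = PySem.Set.update [] (l.map (fun kv => PySem.Str.len kv.1)) := by
    rw [hdG, PySem.Dict.keys_foldl_modify_key l (fun kv => PySem.Str.len kv.1) []
      (fun _ kv => fun ps => ps ++ [kv]) PySem.Dict.empty]; rfl
  have hnodup : (PySem.Set.update ([] : PySem.Set Int)
      (l.map (fun kv => PySem.Str.len kv.1))).Nodup :=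
    PySem.Set.nodup_update _ _ List.nodup_nil
  have hiA : dA.items = dA.keys.map (fun L => (L, dA.getD L ("", 0))) :=
    PySem.Dict.items_eq_map_keys dA (hkA ▸ hnodup) ("", 0)
  have hiG : dG.items = dG.keys.map (fun L => (L, dG.getD L [])) :=
    PySem.Dict.items_eq_map_keys dG (hkG ▸ hnodup) []
  rw [hiA, hiG, List.map_map, hkA, hkG]
  apply List.map_congr_left
  intro L _
  simp only [Function.comp_apply]
  have hvA : dA.getD L ("", 0) =
      ((l.filter (fun kv => PySem.Str.len kv.1 == L)).foldl pvStep1 none).getD ("", 0) := by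
    rw [PySem.Dict.getD_eq_get?_getD, hdA, pvFoldA_get?]
    rfl
  have hvG : dG.getD L [] = l.filter (fun kv => PySem.Str.len kv.1 == L) := by
    rw [hdG]; exact pvGroups_getD l L
  rw [hvA, hvG, pvMax?_eq_foldl]

-- ===== VERDICT (by name: the statement is the Claim_ definition above) =====
theorem extract_most_present_pattern_by_len_spec : Claim_equal_extract_most_present_pattern_by_len := by
  intro l _
  unfold Spec_extract_most_present_pattern_by_len
  exact pvMain l
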